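-- pv_equiv track=rewrite | github.com/daimonie/sublime-assistant-package | assistant/api.py | _format_tool_summary
-- ===== SOURCE A (Python) =====
-- def _format_tool_summary(tools_invoked: list[tuple[str, int]]) -> str:
--     """One-line summary of which tools were run and how much data was sent back (for error messages).
--     Each tuple is (tool_name, result_size_chars)."""
--     if not tools_invoked:
--         return "**Tool calls this request:** none"
--     # Group by name: (count, total_chars)
--     by_name: dict[str, tuple[int, int]] = {}
--     for name, size in tools_invoked:
--         c, t = by_name.get(name, (0, 0))
--         by_name[name] = (c + 1, t + size)
--     parts = []
--     for name in sorted(by_name.keys()):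
--         count, total_chars = by_name[name]
--         approx_tokens = total_chars // 4
--         size_str = f"{total_chars:,} chars, ~{approx_tokens:,} tokens"
--         parts.append(f"{name} ({count} call{'s' if count != 1 else ''}, {size_str} sent to model)")
--     return "**Tool calls this request:** " + "; ".join(parts)
-- ===== SOURCE B (Python) =====
-- from itertools import groupby
--
--
-- def _format_tool_summary(tools_invoked: list[tuple[str, int]]) -> str:
--     """One-line summary of which tools were run and how much data was sent back (for error messages).
--     Each tuple is (tool_name, result_size_chars)."""
--     if not tools_invoked:
--         return "**Tool calls this request:** none"
--     parts = []
--     for name, grp in groupby(sorted(tools_invoked, key=lambda pair: pair[0]), key=lambda pair: pair[0]):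
--         sizes = [size for _, size in grp]
--         count = len(sizes)
--         total_chars = sum(sizes)
--         approx_tokens = total_chars // 4
--         parts.append(
--             f"{name} ({count} call{'s' if count != 1 else ''}, "
--             f"{total_chars:,} chars, ~{approx_tokens:,} tokens sent to model)"
--         )
--     return "**Tool calls this request:** " + "; ".join(parts)
-- ===== Notes on version B (the rewrite author's own statement) =====
-- stated objective: idiomatic
-- what changed: Replaces the dict-accumulate-then-sort-keys pass with a sort-then-collapse pass: the pair list is sorted by tool name and itertools.groupby collapses each adjacent run into its count and size total.
import Mathlib
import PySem

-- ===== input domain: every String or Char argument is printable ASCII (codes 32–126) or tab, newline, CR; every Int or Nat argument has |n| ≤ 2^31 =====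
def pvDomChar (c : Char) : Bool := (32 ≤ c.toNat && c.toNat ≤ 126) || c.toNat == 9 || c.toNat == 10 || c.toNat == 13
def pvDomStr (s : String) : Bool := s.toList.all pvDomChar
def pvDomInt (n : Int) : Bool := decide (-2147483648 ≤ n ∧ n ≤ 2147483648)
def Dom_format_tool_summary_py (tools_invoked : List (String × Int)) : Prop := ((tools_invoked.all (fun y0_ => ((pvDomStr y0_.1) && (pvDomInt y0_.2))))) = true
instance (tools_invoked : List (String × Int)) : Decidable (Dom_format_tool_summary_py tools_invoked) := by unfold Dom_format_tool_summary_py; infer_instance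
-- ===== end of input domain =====

-- B re-groups by sorting the pairs and collapsing adjacent runs (itertools.groupby) instead of
-- accumulating a dict and sorting its keys; same output, alternative decomposition.

-- shared formatting helpers (both Pythons build the identical f-string; ported once, by hand:
-- pvComma is f"{n:,}" — str(abs(n)) grouped in threes from the right, '-' in front — exact for all Int)
def pvChunk3 : List Char → List Char
  | a :: b :: c :: d :: rest => a :: b :: c :: ',' :: pvChunk3 (d :: rest)
  | l => l

def pvComma (n : Int) : List Char :=
  (if n < 0 then ['-'] else []) ++ (pvChunk3 (PySem.Int.toChars (n.natAbs : Int)).reverse).reverse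

def pvPart (name : String) (count total : Int) : List Char :=
  name.toList ++ " (".toList ++ PySem.Int.toChars count ++ " call".toList ++
  (if count ≠ 1 then ['s'] else []) ++ ", ".toList ++
  pvComma total ++ " chars, ~".toList ++ pvComma (PySem.Int.floordiv total 4) ++
  " tokens".toList ++ " sent to model)".toList

-- ===== PORT A =====
def format_tool_summary_py (tools_invoked : List (String × Int)) : String :=
  if tools_invoked = [] then "**Tool calls this request:** none"
  else
    let by_name : PySem.Dict String (Int × Int) :=
      tools_invoked.foldl
        (fun d p => d.insert p.1 ((d.getD p.1 (0, 0)).1 + 1, (d.getD p.1 (0, 0)).2 + p.2))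
        PySem.Dict.empty
    let parts : List (List Char) :=
      (PySem.List.sorted by_name.keys (fun k => k) false).map
        (fun name => pvPart name (by_name.getD name (0, 0)).1 (by_name.getD name (0, 0)).2)
    String.ofList ("**Tool calls this request:** ".toList ++ PySem.Chars.join "; ".toList parts)

-- ===== PORT B =====
-- itertools.groupby over the name-sorted list: each step peels one maximal run of equal names
def pvGroupRuns : List (String × Int) → List (String × List Int)
  | [] => []
  | p :: rest =>
      (p.1, p.2 :: (rest.takeWhile (fun q => q.1 == p.1)).map (·.2)) ::
        pvGroupRuns (rest.dropWhile (fun q => q.1 == p.1))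
  termination_by l => l.length
  decreasing_by
    simp only [List.length_cons]
    exact Nat.lt_succ_of_le (List.length_dropWhile_le _ _)

def format_tool_summary_py_alt (tools_invoked : List (String × Int)) : String :=
  if tools_invoked = [] then "**Tool calls this request:** none"
  else
    let groups := pvGroupRuns (PySem.List.sorted tools_invoked (fun p => p.1) false)
    let parts : List (List Char) :=
      groups.map (fun g => pvPart g.1 (g.2.length : Int) g.2.sum)
    String.ofList ("**Tool calls this request:** ".toList ++ PySem.Chars.join "; ".toList parts)

-- ===== PRECONDITION & SPEC =====
def Spec_format_tool_summary_py (tools_invoked : List (String × Int)) (out : String) : Prop := out = format_tool_summary_py_alt tools_invoked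
instance (tools_invoked : List (String × Int)) (out : String) : Decidable (Spec_format_tool_summary_py tools_invoked out) := by unfold Spec_format_tool_summary_py; infer_instance

-- ===== CLAIM (what is proved, stated in full; the proofs are below) =====
def Claim_equal_format_tool_summary_py : Prop := ∀ (tools_invoked : List (String × Int)), Dom_format_tool_summary_py tools_invoked → Spec_format_tool_summary_py tools_invoked (format_tool_summary_py tools_invoked)

-- ===== LEMMAS AND PROOFS =====

-- the sizes recorded for one name, in list order
def pvSizesOf (n : String) (l : List (String × Int)) : List Int :=
  (l.filter (fun p => p.1 == n)).map (·.2)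

theorem pv_getD_foldl (l : List (String × Int)) (d : PySem.Dict String (Int × Int)) (k : String) :
    ((l.foldl
        (fun d p => d.insert p.1 ((d.getD p.1 (0, 0)).1 + 1, (d.getD p.1 (0, 0)).2 + p.2))
        d).getD k (0, 0)) =
      ((d.getD k (0, 0)).1 + ((pvSizesOf k l).length : Int), (d.getD k (0, 0)).2 + (pvSizesOf k l).sum) := by
  induction l generalizing d with
  | nil => simp [pvSizesOf]
  | cons p l ih =>
    rw [List.foldl_cons, ih]
    rw [PySem.Dict.getD_insert]
    by_cases hk : k = p.1
    · subst hk
      simp only [pvSizesOf, List.filter_cons, BEq.rfl, if_pos, List.map_cons,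
        List.length_cons, List.sum_cons]
      rw [Prod.mk.injEq]
      constructor <;> · push_cast; ring
    · have hne : (p.1 == k) = false := by simp [beq_eq_false_iff_ne]; exact fun h => hk h.symm
      simp only [if_neg hk, pvSizesOf, List.filter_cons, hne, Bool.false_eq_true, if_false]

theorem pvGroupRuns_spec (ys : List (String × Int)) (h : ys.Pairwise (fun a b => a.1 ≤ b.1)) :
    ∃ ns : List String,
      pvGroupRuns ys = ns.map (fun n => (n, pvSizesOf n ys)) ∧
      ns.Pairwise (· < ·) ∧
      (∀ n, n ∈ ns ↔ n ∈ ys.map Prod.fst) := by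
  revert h
  induction ys using pvGroupRuns.induct with
  | case1 => exact fun _ => ⟨[], by simp [pvGroupRuns]⟩
  | case2 p rest ih =>
    intro h
    rw [List.pairwise_cons] at h
    obtain ⟨hp, hrest⟩ := h
    have hsplit : rest.takeWhile (fun q => q.1 == p.1) ++ rest.dropWhile (fun q => q.1 == p.1) = rest :=
      List.takeWhile_append_dropWhile
    have htmem : ∀ q ∈ rest.takeWhile (fun q => q.1 == p.1), q.1 = p.1 := fun q hq => by
      simpa using List.mem_takeWhile_imp hq
    have hrpw : (rest.dropWhile (fun q => q.1 == p.1)).Pairwise (fun a b => a.1 ≤ b.1) :=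
      hrest.sublist (List.dropWhile_sublist _)
    have hfr : ∀ q ∈ rest.dropWhile (fun q => q.1 == p.1), p.1 < q.1 := by
      cases hcr : rest.dropWhile (fun q => q.1 == p.1) with
      | nil => intro q hq; simp at hq
      | cons q0 qs =>
        have h0 := List.head?_dropWhile_not (fun q => q.1 == p.1) rest
        rw [hcr] at h0
        simp only [List.head?_cons] at h0
        have hmem : q0 ∈ rest := by
          have hmem' : q0 ∈ rest.dropWhile (fun q => q.1 == p.1) := by
            rw [hcr]; exact List.mem_cons_self
          exact (List.dropWhile_sublist _).subset hmem'
        have hne' : q0.1 ≠ p.1 := by simpa using h0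
        have hq0lt : p.1 < q0.1 :=
          lt_of_le_of_ne (hp q0 hmem) (fun hx => hne' hx.symm)
        intro q hq
        rcases List.mem_cons.mp hq with rfl | hq'
        · exact hq0lt
        · exact lt_of_lt_of_le hq0lt ((List.pairwise_cons.mp (hcr ▸ hrpw)).1 q hq')
    obtain ⟨ns', hgr, hpw', hmem'⟩ := ih hrpw
    have hrnames : ∀ n ∈ ns', p.1 < n := by
      intro n hn
      obtain ⟨q, hq, rfl⟩ := List.mem_map.mp ((hmem' n).mp hn)
      exact hfr q hq
    refine ⟨p.1 :: ns', ?_, ?_, ?_⟩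
    · rw [pvGroupRuns]
      simp only [List.map_cons]
      congr 1
      · -- head group: all of p.1's sizes are p.2 followed by the run's sizes
        have h1 : pvSizesOf p.1 (p :: rest) =
            p.2 :: ((rest.takeWhile (fun q => q.1 == p.1)).map (·.2) ++
              pvSizesOf p.1 (rest.dropWhile (fun q => q.1 == p.1))) := by
          conv_lhs => rw [← hsplit]
          simp only [pvSizesOf, List.filter_cons, beq_self_eq_true, if_pos, List.filter_append,
            List.map_cons, List.map_append]
          congr 2
          rw [List.filter_eq_self.mpr]
          intro q hq; simpa using (htmem q hq)
        have h2 : pvSizesOf p.1 (rest.dropWhile (fun q => q.1 == p.1)) = [] := by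
          simp only [pvSizesOf, List.map_eq_nil_iff, List.filter_eq_nil_iff]
          intro q hq; simpa using ne_of_gt (hfr q hq)
        rw [h1, h2, List.append_nil]
      · rw [hgr]
        refine List.map_congr_left ?_
        intro n hn
        have hlt := hrnames n hn
        have hsz : pvSizesOf n (p :: rest) = pvSizesOf n (rest.dropWhile (fun q => q.1 == p.1)) := by
          conv_lhs => rw [← hsplit]
          simp only [pvSizesOf, List.filter_cons, List.filter_append]
          have hpne : (p.1 == n) = false := by simpa using ne_of_lt hlt
          rw [hpne]
          have h3 : (rest.takeWhile (fun q => q.1 == p.1)).filter (fun q => q.1 == n) = [] := by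
            rw [List.filter_eq_nil_iff]
            intro q hq
            have hq1 := htmem q hq
            simp only [hq1, beq_iff_eq]
            exact ne_of_lt hlt
          simp [h3]
        rw [hsz]
    · exact List.pairwise_cons.mpr ⟨hrnames, hpw'⟩
    · intro n
      simp only [List.mem_cons, hmem' n]
      conv_rhs => rw [List.map_cons, ← hsplit, List.map_append]
      simp only [List.mem_cons, List.mem_append]
      constructor
      · rintro (rfl | hn)
        · exact Or.inl rfl
        · exact Or.inr (Or.inr hn)
      · rintro (rfl | hn | hn)
        · exact Or.inl rfl
        · obtain ⟨q, hq, rfl⟩ := List.mem_map.mp hn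
          exact Or.inl (htmem q hq)
        · exact Or.inr hn

-- ===== VERDICT (by name: the statement is the Claim_ definition above) =====
theorem format_tool_summary_py_spec : Claim_equal_format_tool_summary_py := by
  unfold Claim_equal_format_tool_summary_py
  intro l _
  unfold Spec_format_tool_summary_py
  by_cases hl : l = []
  · subst hl; rfl
  · obtain ⟨ns, hgr, hlt, hmem⟩ := pvGroupRuns_spec (PySem.List.sorted l (fun p => p.1) false)
      (PySem.List.sorted_pairwise l (fun p => p.1))
    have hperm : (PySem.List.sorted l (fun p => p.1) false).Perm l :=
      PySem.List.sorted_perm l (fun p => p.1) false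
    have hkeys : (l.foldl
        (fun d p => d.insert p.1 ((d.getD p.1 (0, 0)).1 + 1, (d.getD p.1 (0, 0)).2 + p.2))
        (PySem.Dict.empty (κ := String) (ν := Int × Int))).keys
        = PySem.Set.ofList (l.map (fun p => p.1)) := by
      rw [PySem.Dict.keys_foldl_insert_key l (fun p => p.1) _ PySem.Dict.empty,
        PySem.Dict.keys_empty]
      rfl
    have hnodupns : ns.Nodup := hlt.imp (fun h => ne_of_lt h)
    have hmem2 : ∀ n, n ∈ ns ↔ n ∈ PySem.Set.ofList (l.map (fun p => p.1)) := by
      intro n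
      rw [hmem n, PySem.Set.mem_ofList]
      exact (hperm.map (fun p => p.1)).mem_iff
    have hsorted_keys : PySem.List.sorted
        (PySem.Set.ofList (l.map (fun p => p.1))) (fun k => k) false = ns :=
      PySem.List.sorted_eq_of_perm_of_pairwise_lt _ ns (fun k => k)
        ((List.perm_ext_iff_of_nodup hnodupns (PySem.Set.nodup_ofList _)).mpr hmem2)
        hlt
    simp only [format_tool_summary_py, format_tool_summary_py_alt, if_neg hl]
    rw [hkeys, hsorted_keys, hgr, List.map_map]
    congr 3
    refine List.map_congr_left ?_
    intro n _
    have hf : ((PySem.List.sorted l (fun p => p.1) false).filter (fun p => p.1 == n)).Perm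
        (l.filter (fun p => p.1 == n)) := hperm.filter _
    have hflen : (pvSizesOf n (PySem.List.sorted l (fun p => p.1) false)).length
        = (pvSizesOf n l).length := by
      simpa [pvSizesOf] using (hf.map (·.2)).length_eq
    have hfsum : (pvSizesOf n (PySem.List.sorted l (fun p => p.1) false)).sum
        = (pvSizesOf n l).sum := by
      simpa [pvSizesOf] using (hf.map (·.2)).sum_eq
    simp only [Function.comp_apply]
    rw [pv_getD_foldl, PySem.Dict.getD_empty]
    simp only [zero_add]
    rw [← hflen, ← hfsum]
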